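-- pv_equiv track=rewrite | github.com/uriberger/ViLT | acquisition/clustering.py | aggregate_intersection_counts
-- ===== SOURCE A (Python) =====
-- def aggregate_intersection_counts(gt_labels, predicted_labels):
--     cluster_to_gt_intersection = {}
--     gt_to_cluster_intersection = {}
--     gt_class_count = {}
--     cluster_count = {}
--     for i in range(len(gt_labels)):
--         gt_class = gt_labels[i]
--         predicted_cluster = predicted_labels[i]
--
--         # Update counts
--         if gt_class not in gt_class_count:
--             gt_class_count[gt_class] = 0
--         gt_class_count[gt_class] += 1
--         if predicted_cluster not in cluster_count:
--             cluster_count[predicted_cluster] = 0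
--         cluster_count[predicted_cluster] += 1
--
--         # Update gt class to cluster mapping
--         if gt_class not in gt_to_cluster_intersection:
--             gt_to_cluster_intersection[gt_class] = {predicted_cluster: 0}
--         if predicted_cluster not in gt_to_cluster_intersection[gt_class]:
--             gt_to_cluster_intersection[gt_class][predicted_cluster] = 0
--         gt_to_cluster_intersection[gt_class][predicted_cluster] += 1
--
--         # Update cluster to gt class mapping
--         if predicted_cluster not in cluster_to_gt_intersection:
--             cluster_to_gt_intersection[predicted_cluster] = {gt_class: 0}
--         if gt_class not in cluster_to_gt_intersection[predicted_cluster]: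
--             cluster_to_gt_intersection[predicted_cluster][gt_class] = 0
--         cluster_to_gt_intersection[predicted_cluster][gt_class] += 1
--
--     return cluster_to_gt_intersection, gt_to_cluster_intersection, gt_class_count, cluster_count
-- ===== SOURCE B (Python) =====
-- def aggregate_intersection_counts(gt_labels, predicted_labels):
--     # Phase 1: one pass building three flat count dicts (pair, gt, cluster).
--     pair_count = {}
--     gt_class_count = {}
--     cluster_count = {}
--     for p in zip(gt_labels, predicted_labels):
--         g, c = p
--         gt_class_count[g] = gt_class_count.get(g, 0) + 1
--         cluster_count[c] = cluster_count.get(c, 0) + 1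
--         pair_count[p] = pair_count.get(p, 0) + 1
--     # Phase 2: reshape the flat pair counter into the two nested dicts.
--     gt_to_cluster_intersection = {}
--     cluster_to_gt_intersection = {}
--     for (g, c), n in pair_count.items():
--         gt_to_cluster_intersection.setdefault(g, {})[c] = n
--         cluster_to_gt_intersection.setdefault(c, {})[g] = n
--     return cluster_to_gt_intersection, gt_to_cluster_intersection, gt_class_count, cluster_count
-- ===== Notes on version B (the rewrite author's own statement) =====
-- stated objective: alternative
-- what changed: A interleaves four conditional dict updates (two of them nested two-level updates) inside one indexed loop; B instead does a two-phase aggregate-then-reshape: one pass over zip(gt,pred) building three flat counters (pair, gt, cluster), then a second, differently-shaped pass over the pair-counter's items that inserts each pair's final total into the two nested dicts.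
import Mathlib
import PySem

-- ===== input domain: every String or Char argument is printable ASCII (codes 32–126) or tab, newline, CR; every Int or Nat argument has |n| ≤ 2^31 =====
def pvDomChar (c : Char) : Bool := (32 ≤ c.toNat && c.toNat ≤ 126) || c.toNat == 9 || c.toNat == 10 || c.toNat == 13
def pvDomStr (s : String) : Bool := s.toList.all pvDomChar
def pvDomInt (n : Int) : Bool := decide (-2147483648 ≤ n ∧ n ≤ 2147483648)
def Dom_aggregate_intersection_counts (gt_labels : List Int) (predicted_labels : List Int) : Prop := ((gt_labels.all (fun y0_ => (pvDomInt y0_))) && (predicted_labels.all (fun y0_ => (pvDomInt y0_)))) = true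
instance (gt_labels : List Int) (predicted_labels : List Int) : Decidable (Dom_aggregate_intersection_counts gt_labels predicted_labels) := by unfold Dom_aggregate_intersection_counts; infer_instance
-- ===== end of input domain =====

-- B replaces A's single loop of interleaved nested-dict updates by a two-phase
-- aggregate-then-reshape (flat counters first, then a second pass over the pair
-- counter building the nested dicts); same cost, different structure (objective: alternative).

-- ===== PORT A =====
def aggregate_intersection_counts (gt_labels : List Int) (predicted_labels : List Int) : (List (Int × List (Int × Int))) × (List (Int × List (Int × Int))) × (List (Int × Int)) × (List (Int × Int)) :=
  -- for i in range(len(gt_labels)): ... (four dicts updated in A's textual order)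
  let st := (PySem.List.pyRange 0 (gt_labels.length : Int) 1).foldl (fun st i =>
      let ctg := st.1; let gtc := st.2.1; let gcc := st.2.2.1; let cc := st.2.2.2
      let g := PySem.List.pyGetD gt_labels i 0          -- gt_labels[i] (in range under Pre_)
      let c := PySem.List.pyGetD predicted_labels i 0   -- predicted_labels[i] (in range under Pre_)
      -- if gt_class not in gt_class_count: = 0 ; then += 1
      let gcc := if gcc.contains g = false then gcc.insert g 0 else gcc
      let gcc := gcc.insert g (gcc.getD g 0 + 1)
      let cc := if cc.contains c = false then cc.insert c 0 else cc
      let cc := cc.insert c (cc.getD c 0 + 1)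
      -- gt class -> cluster nested update
      let gtc := if gtc.contains g = false then gtc.insert g (PySem.Dict.empty.insert c 0) else gtc
      let gtc := if (gtc.getD g PySem.Dict.empty).contains c = false then gtc.insert g ((gtc.getD g PySem.Dict.empty).insert c 0) else gtc
      let gtc := gtc.insert g ((gtc.getD g PySem.Dict.empty).insert c ((gtc.getD g PySem.Dict.empty).getD c 0 + 1))
      -- cluster -> gt class nested update
      let ctg := if ctg.contains c = false then ctg.insert c (PySem.Dict.empty.insert g 0) else ctg
      let ctg := if (ctg.getD c PySem.Dict.empty).contains g = false then ctg.insert c ((ctg.getD c PySem.Dict.empty).insert g 0) else ctg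
      let ctg := ctg.insert c ((ctg.getD c PySem.Dict.empty).insert g ((ctg.getD c PySem.Dict.empty).getD g 0 + 1))
      (ctg, gtc, gcc, cc))
    (PySem.Dict.empty, PySem.Dict.empty, PySem.Dict.empty, PySem.Dict.empty)
  (st.1.items.map (fun q => (q.1, q.2.items)), st.2.1.items.map (fun q => (q.1, q.2.items)), st.2.2.1.items, st.2.2.2.items)

-- ===== PORT B =====
def aggregate_intersection_counts_alt (gt_labels : List Int) (predicted_labels : List Int) : (List (Int × List (Int × Int))) × (List (Int × List (Int × Int))) × (List (Int × Int)) × (List (Int × Int)) :=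
  -- phase 1: for p in zip(...): three flat counters (pair_count, gt_class_count, cluster_count)
  let st := (gt_labels.zip predicted_labels).foldl (fun st p =>
      (st.1.insert p (st.1.getD p 0 + 1),
       st.2.1.insert p.1 (st.2.1.getD p.1 0 + 1),
       st.2.2.insert p.2 (st.2.2.getD p.2 0 + 1)))
    ((PySem.Dict.empty : PySem.Dict (Int × Int) Int), (PySem.Dict.empty : PySem.Dict Int Int), (PySem.Dict.empty : PySem.Dict Int Int))
  -- phase 2: for (g, c), n in pair_count.items(): setdefault(...)[...] = n  (≡ Dict.modify)
  let st2 := st.1.items.foldl (fun st2 q =>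
      (st2.1.modify q.1.1 PySem.Dict.empty (fun inner => inner.insert q.1.2 q.2),
       st2.2.modify q.1.2 PySem.Dict.empty (fun inner => inner.insert q.1.1 q.2)))
    ((PySem.Dict.empty : PySem.Dict Int (PySem.Dict Int Int)), (PySem.Dict.empty : PySem.Dict Int (PySem.Dict Int Int)))
  (st2.2.items.map (fun q => (q.1, q.2.items)), st2.1.items.map (fun q => (q.1, q.2.items)), st.2.1.items, st.2.2.items)

-- ===== PRECONDITION & SPEC =====
-- Pre_ excludes exactly the inputs where A raises IndexError (gt_labels longer than predicted_labels).
def Pre_aggregate_intersection_counts (gt_labels : List Int) (predicted_labels : List Int) : Prop :=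
  gt_labels.length ≤ predicted_labels.length
instance (gt_labels : List Int) (predicted_labels : List Int) : Decidable (Pre_aggregate_intersection_counts gt_labels predicted_labels) := by unfold Pre_aggregate_intersection_counts; infer_instance
def pvWitness_aggregate_intersection_counts : List Int × List Int := ([1, 2, 1, 2], [5, 6, 5, 5])

def Spec_aggregate_intersection_counts (gt_labels : List Int) (predicted_labels : List Int) (out : (List (Int × List (Int × Int))) × (List (Int × List (Int × Int))) × (List (Int × Int)) × (List (Int × Int))) : Prop := out = aggregate_intersection_counts_alt gt_labels predicted_labels
instance (gt_labels : List Int) (predicted_labels : List Int) (out : (List (Int × List (Int × Int))) × (List (Int × List (Int × Int))) × (List (Int × Int)) × (List (Int × Int))) : Decidable (Spec_aggregate_intersection_counts gt_labels predicted_labels out) := by unfold Spec_aggregate_intersection_counts; infer_instance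

-- ===== CLAIM (what is proved, stated in full; the proofs are below) =====
def Claim_equal_aggregate_intersection_counts : Prop := ∀ (gt_labels : List Int) (predicted_labels : List Int), Dom_aggregate_intersection_counts gt_labels predicted_labels → Pre_aggregate_intersection_counts gt_labels predicted_labels → Spec_aggregate_intersection_counts gt_labels predicted_labels (aggregate_intersection_counts gt_labels predicted_labels)

-- ===== LEMMAS AND PROOFS =====

def pvStepN (o i : Int × Int → Int) (d : PySem.Dict Int (PySem.Dict Int Int)) (p : Int × Int) : PySem.Dict Int (PySem.Dict Int Int) :=
  d.insert (o p) ((d.getD (o p) PySem.Dict.empty).insert (i p) ((d.getD (o p) PySem.Dict.empty).getD (i p) 0 + 1))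
def pvCanon (o i : Int × Int → Int) (pairs : List (Int × Int)) : PySem.Dict Int (PySem.Dict Int Int) :=
  PySem.Dict.mk ((PySem.Set.ofList (pairs.map o)).map (fun g => (g,
    PySem.Dict.mk ((PySem.Set.ofList ((pairs.filter (fun p => o p == g)).map i)).map (fun c =>
      (c, ((pairs.filter (fun p => o p == g && i p == c)).length : Int)))))))

theorem getD_mkmap {ν : Type} (S : List Int) (f : Int → ν) (hS : S.Nodup) (g : Int) (hg : g ∈ S) (d0 : ν) :
    (PySem.Dict.mk (S.map (fun k => (k, f k)))).getD g d0 = f g := by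
  apply PySem.Dict.getD_of_mem_items
  · exact List.mem_map_of_mem hg
  · show (List.map Prod.fst (S.map (fun k => (k, f k)))).Nodup
    simpa [List.map_map, Function.comp_def] using hS
theorem getD_mkmap_not {ν : Type} (S : List Int) (f : Int → ν) (g : Int) (hg : ¬ g ∈ S) (d0 : ν) :
    (PySem.Dict.mk (S.map (fun k => (k, f k)))).getD g d0 = d0 := by
  apply PySem.Dict.getD_of_not_contains
  simp [PySem.Dict.contains_eq_decide_mem_keys, PySem.Dict.keys, List.map_map, Function.comp_def]
  simpa using hg
theorem contains_mkmap {ν : Type} (S : List Int) (f : Int → ν) (g : Int) :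
    (PySem.Dict.mk (S.map (fun k => (k, f k)))).contains g = decide (g ∈ S) := by
  simp [PySem.Dict.contains_eq_decide_mem_keys, PySem.Dict.keys, List.map_map, Function.comp_def]
theorem items_ins_not {κ ν : Type} [BEq κ] (d : PySem.Dict κ ν) (k : κ) (v : ν) (h : d.contains k = false) :
    (d.insert k v).items = d.items ++ [(k, v)] :=
  PySem.Dict.items_insert_of_not_contains d v h
theorem items_ins_yes {κ ν : Type} [BEq κ] (d : PySem.Dict κ ν) (k : κ) (v : ν) (h : d.contains k = true) :
    (d.insert k v).items = d.items.map (fun p => if p.1 == k then (k, v) else p) :=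
  PySem.Dict.items_insert_of_contains d v h
theorem ofList_append_singleton {T : Type} [BEq T] (l : List T) (x : T) :
    PySem.Set.ofList (l ++ [x]) = PySem.Set.add (PySem.Set.ofList l) x := by
  simp [PySem.Set.ofList_eq_foldl, List.foldl_append]
theorem set_add_mem (s : PySem.Set Int) (x : Int) (h : x ∈ s) : PySem.Set.add s x = s := by
  simp [PySem.Set.add, PySem.Set.contains_eq_decide, h]
theorem set_add_not_mem (s : PySem.Set Int) (x : Int) (h : ¬ x ∈ s) : PySem.Set.add s x = s ++ [x] := by
  simp [PySem.Set.add, PySem.Set.contains_eq_decide, h]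

theorem pv_charA (o i : Int × Int → Int) (hinj : ∀ p q : Int × Int, o p = o q → i p = i q → p = q)
    (pairs : List (Int × Int)) :
    pairs.foldl (pvStepN o i) PySem.Dict.empty = pvCanon o i pairs := by
  induction pairs using List.reverseRecOn with
  | nil => rfl
  | append_singleton l p ih =>
    rw [List.foldl_append, List.foldl_cons, List.foldl_nil, ih]
    set S := PySem.Set.ofList (l.map o) with hS
    have hSnd : S.Nodup := PySem.Set.nodup_ofList _
    set T : Int → List Int := fun g => PySem.Set.ofList ((l.filter (fun q => o q == g)).map i) with hT
    have hTnd : ∀ g, (T g).Nodup := fun g => PySem.Set.nodup_ofList _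
    set cnt : Int → Int → Int := fun g c => ((l.filter (fun q => o q == g && i q == c)).length : Int) with hcnt
    set F : Int → PySem.Dict Int Int := fun g => PySem.Dict.mk ((T g).map (fun c => (c, cnt g c))) with hF
    set S' := PySem.Set.ofList ((l ++ [p]).map o) with hS'
    set T' : Int → List Int := fun g => PySem.Set.ofList (((l ++ [p]).filter (fun q => o q == g)).map i) with hT'
    set cnt' : Int → Int → Int := fun g c => (((l ++ [p]).filter (fun q => o q == g && i q == c)).length : Int) with hcnt'
    set F' : Int → PySem.Dict Int Int := fun g => PySem.Dict.mk ((T' g).map (fun c => (c, cnt' g c))) with hF'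
    show pvStepN o i (PySem.Dict.mk (S.map (fun g => (g, F g)))) p
       = PySem.Dict.mk (S'.map (fun g => (g, F' g)))
    have hT'eq : ∀ g, T' g = if o p = g then PySem.Set.add (T g) (i p) else T g := by
      intro g; rw [hT']; simp only [hT]
      by_cases h : o p = g
      · simp [List.filter_append, List.filter_singleton, h, ofList_append_singleton]
      · simp [List.filter_append, List.filter_singleton, h]
    have hcnt'eq : ∀ g c, cnt' g c = cnt g c + (if o p = g ∧ i p = c then 1 else 0) := by
      intro g c; rw [hcnt']; simp only [hcnt]
      by_cases h1 : o p = g <;> by_cases h2 : i p = c <;>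
        simp [List.filter_append, List.filter_singleton, h1, h2]
    have hinner : ∀ g, F' g = if o p = g then (F g).insert (i p) ((F g).getD (i p) 0 + 1) else F g := by
      intro g
      by_cases h : o p = g
      · subst h
        rw [if_pos rfl]
        by_cases hcT : i p ∈ T (o p)
        · have hgetDi : (F (o p)).getD (i p) 0 = cnt (o p) (i p) := by
            rw [hF]; exact getD_mkmap _ _ (hTnd _) _ hcT _
          have hconti : (F (o p)).contains (i p) = true := by
            rw [hF, contains_mkmap]; simpa using hcT
          apply PySem.Dict.ext
          rw [hgetDi]
          simp only [hF']
          rw [items_ins_yes _ _ _ hconti, hT'eq, if_pos rfl, set_add_mem _ _ hcT]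
          simp only [hF]
          show (T (o p)).map (fun c => (c, cnt' (o p) c))
             = ((T (o p)).map (fun c => (c, cnt (o p) c))).map
                 (fun q => if q.1 == i p then (i p, cnt (o p) (i p) + 1) else q)
          rw [List.map_map]
          apply List.map_congr_left
          intro c hc
          by_cases hci : c = i p
          · subst hci
            simp only [Function.comp_def, beq_self_eq_true, if_pos]
            rw [hcnt'eq]; simp
          · have hb : (c == i p) = false := by simp [hci]
            simp only [Function.comp_def, hb, Bool.false_eq_true, if_false]
            rw [hcnt'eq]
            simp [Ne.symm hci]
        · have hgetDi : (F (o p)).getD (i p) 0 = 0 := by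
            rw [hF]; exact getD_mkmap_not _ _ _ hcT _
          have hconti : (F (o p)).contains (i p) = false := by
            rw [hF, contains_mkmap]; simpa using hcT
          have hfilnil : (l.filter (fun q => o q == o p && i q == i p)) = [] := by
            rw [List.filter_eq_nil_iff]
            intro q hq hq2
            simp only [Bool.and_eq_true, beq_iff_eq] at hq2
            refine hcT ?_
            rw [hT, PySem.Set.mem_ofList]
            have : q ∈ l.filter (fun r => o r == o p) := List.mem_filter.2 ⟨hq, by simp [hq2.1]⟩
            simpa [hq2.2] using List.mem_map_of_mem (f := i) this
          have hcnt0 : cnt (o p) (i p) = 0 := by rw [hcnt]; simp [hfilnil]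
          apply PySem.Dict.ext
          rw [hgetDi]
          simp only [hF']
          rw [items_ins_not _ _ _ hconti, hT'eq, if_pos rfl, set_add_not_mem _ _ hcT]
          simp only [hF]
          show (T (o p) ++ [i p]).map (fun c => (c, cnt' (o p) c))
             = ((T (o p)).map (fun c => (c, cnt (o p) c))) ++ [(i p, 0 + 1)]
          rw [List.map_append]
          congr 1
          · apply List.map_congr_left
            intro c hc
            rw [hcnt'eq]
            simp [show i p ≠ c from fun hh => hcT (hh ▸ hc)]
          · simp only [List.map_cons, List.map_nil]
            rw [hcnt'eq]
            simp [hcnt0]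
      · rw [if_neg h]
        simp only [hF', hF]
        rw [hT'eq, if_neg h]
        congr 1
        apply List.map_congr_left
        intro c hc
        rw [hcnt'eq]
        simp [show ¬(o p = g ∧ i p = c) from fun hh => h hh.1]
    by_cases hg : o p ∈ S
    · have hcont : (PySem.Dict.mk (S.map (fun g => (g, F g)))).contains (o p) = true := by
        rw [contains_mkmap]; simpa using hg
      have hgetD : (PySem.Dict.mk (S.map (fun g => (g, F g)))).getD (o p) PySem.Dict.empty = F (o p) :=
        getD_mkmap S F hSnd _ hg _
      have hS'eq : S' = S := by
        rw [hS', List.map_append, List.map_cons, List.map_nil, ofList_append_singleton, ← hS, set_add_mem _ _ hg]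
      apply PySem.Dict.ext
      rw [hS'eq]
      show ((PySem.Dict.mk (S.map (fun g => (g, F g)))).insert (o p)
        (((PySem.Dict.mk (S.map (fun g => (g, F g)))).getD (o p) PySem.Dict.empty).insert (i p)
          (((PySem.Dict.mk (S.map (fun g => (g, F g)))).getD (o p) PySem.Dict.empty).getD (i p) 0 + 1))).items
        = S.map (fun g => (g, F' g))
      rw [hgetD, items_ins_yes _ _ _ hcont]
      show (S.map (fun g => (g, F g))).map
          (fun q => if q.1 == o p then (o p, (F (o p)).insert (i p) ((F (o p)).getD (i p) 0 + 1)) else q)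
        = S.map (fun g => (g, F' g))
      rw [List.map_map]
      apply List.map_congr_left
      intro g hgS
      by_cases hgg : g = o p
      · subst hgg
        simp only [Function.comp_def, beq_self_eq_true, if_pos]
        rw [hinner, if_pos rfl]
      · have hb : (g == o p) = false := by simp [hgg]
        simp only [Function.comp_def, hb, Bool.false_eq_true, if_false]
        rw [hinner, if_neg (fun hh => hgg hh.symm)]
    · have hcont : (PySem.Dict.mk (S.map (fun g => (g, F g)))).contains (o p) = false := by
        rw [contains_mkmap]; simpa using hg
      have hgetD : (PySem.Dict.mk (S.map (fun g => (g, F g)))).getD (o p) PySem.Dict.empty = PySem.Dict.empty :=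
        getD_mkmap_not S F _ hg _
      have hS'eq : S' = S ++ [o p] := by
        rw [hS', List.map_append, List.map_cons, List.map_nil, ofList_append_singleton, ← hS, set_add_not_mem _ _ hg]
      have hfilnil : (l.filter (fun q => o q == o p)) = [] := by
        rw [List.filter_eq_nil_iff]
        intro q hq hq2
        simp only [beq_iff_eq] at hq2
        exact hg (by rw [hS, PySem.Set.mem_ofList]; exact hq2 ▸ List.mem_map_of_mem hq)
      apply PySem.Dict.ext
      rw [hS'eq]
      show ((PySem.Dict.mk (S.map (fun g => (g, F g)))).insert (o p)
        (((PySem.Dict.mk (S.map (fun g => (g, F g)))).getD (o p) PySem.Dict.empty).insert (i p)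
          (((PySem.Dict.mk (S.map (fun g => (g, F g)))).getD (o p) PySem.Dict.empty).getD (i p) 0 + 1))).items
        = (S ++ [o p]).map (fun g => (g, F' g))
      rw [hgetD, items_ins_not _ _ _ hcont, List.map_append]
      congr 1
      · apply List.map_congr_left
        intro g hgS
        have hgg : ¬ (o p = g) := fun hh => hg (hh ▸ hgS)
        rw [hinner, if_neg hgg]
      · simp only [List.map_cons, List.map_nil]
        have hTe : T (o p) = [] := by rw [hT]; simp [hfilnil, PySem.Set.ofList]
        have hT'e : T' (o p) = [i p] := by
          rw [hT'eq, if_pos rfl, set_add_not_mem _ _ (by simp [hTe]), hTe]; rfl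
        have hc' : cnt' (o p) (i p) = 1 := by
          rw [hcnt'eq]
          have : cnt (o p) (i p) = 0 := by
            rw [hcnt]
            have : (l.filter (fun q => o q == o p && i q == i p)) = [] := by
              rw [List.filter_eq_nil_iff]
              intro q hq hq2
              simp only [Bool.and_eq_true, beq_iff_eq] at hq2
              have : q ∈ l.filter (fun r => o r == o p) := List.mem_filter.2 ⟨hq, by simp [hq2.1]⟩
              simp [hfilnil] at this
            simp [this]
          simp [this]
        have hFval : F' (o p) = PySem.Dict.mk [(i p, 1)] := by
          simp only [hF']
          rw [hT'e]
          simp [hc']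
        rw [hFval]
        rw [PySem.Dict.getD_empty]
        norm_num
        apply PySem.Dict.ext
        rfl

def pvReshapeStep (o i : Int × Int → Int) (d : PySem.Dict Int (PySem.Dict Int Int)) (q : (Int × Int) × Int) : PySem.Dict Int (PySem.Dict Int Int) :=
  d.insert (o q.1) ((d.getD (o q.1) PySem.Dict.empty).insert (i q.1) q.2)

theorem pv_charB0 (o i : Int × Int → Int) (hinj : ∀ p q : Int × Int, o p = o q → i p = i q → p = q) :
    ∀ ps : List ((Int × Int) × Int), (ps.map (·.1)).Nodup →
    ps.foldl (pvReshapeStep o i) PySem.Dict.empty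
      = PySem.Dict.mk ((PySem.Set.ofList (ps.map (fun q => o q.1))).map (fun g =>
          (g, PySem.Dict.mk ((ps.filter (fun q => o q.1 == g)).map (fun q => (i q.1, q.2)))))) := by
  intro ps
  induction ps using List.reverseRecOn with
  | nil => intro _; rfl
  | append_singleton l q ih =>
    intro hnd
    have hndl : (l.map (·.1)).Nodup := by
      rw [List.map_append] at hnd; exact (List.nodup_append.mp hnd).1
    have hfresh : ∀ r ∈ l, r.1 ≠ q.1 := by
      rw [List.map_append] at hnd
      intro r hr h
      have h2 := (List.nodup_append.mp hnd).2.2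
      exact h2 r.1 (List.mem_map_of_mem hr) q.1 (by simp) h
    rw [List.foldl_append, List.foldl_cons, List.foldl_nil, ih hndl]
    set Sb := PySem.Set.ofList (l.map (fun q => o q.1)) with hSb
    have hSbnd : Sb.Nodup := PySem.Set.nodup_ofList _
    set Fb : Int → PySem.Dict Int Int := fun g => PySem.Dict.mk ((l.filter (fun r => o r.1 == g)).map (fun r => (i r.1, r.2))) with hFb
    show pvReshapeStep o i (PySem.Dict.mk (Sb.map (fun g => (g, Fb g)))) q = _
    have houter : PySem.Set.ofList ((l ++ [q]).map (fun r => o r.1))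
        = if o q.1 ∈ Sb then Sb else Sb ++ [o q.1] := by
      rw [List.map_append, List.map_cons, List.map_nil, ofList_append_singleton, ← hSb]
      by_cases h : o q.1 ∈ Sb
      · rw [set_add_mem _ _ h, if_pos h]
      · rw [set_add_not_mem _ _ h, if_neg h]
    have hfil : ∀ g, (l ++ [q]).filter (fun r => o r.1 == g)
        = l.filter (fun r => o r.1 == g) ++ (if o q.1 = g then [q] else []) := by
      intro g
      rw [List.filter_append]
      by_cases h : o q.1 = g <;> simp [List.filter_singleton, h]
    by_cases hg : o q.1 ∈ Sb
    · have hcont : (PySem.Dict.mk (Sb.map (fun g => (g, Fb g)))).contains (o q.1) = true := by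
        rw [contains_mkmap]; simpa using hg
      have hgetD : (PySem.Dict.mk (Sb.map (fun g => (g, Fb g)))).getD (o q.1) PySem.Dict.empty = Fb (o q.1) :=
        getD_mkmap Sb Fb hSbnd _ hg _
      have hconti : (Fb (o q.1)).contains (i q.1) = false := by
        rw [hFb]
        simp only [PySem.Dict.contains_eq_decide_mem_keys, PySem.Dict.keys, List.map_map]
        rw [decide_eq_false_iff_not]
        intro hmem
        simp only [List.mem_map, Function.comp_def] at hmem
        obtain ⟨r, hrf, hri⟩ := hmem
        have hro := (List.mem_filter.mp hrf).2
        simp only [beq_iff_eq] at hro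
        exact hfresh r (List.mem_filter.mp hrf).1 (hinj r.1 q.1 hro hri)
      apply PySem.Dict.ext
      show ((PySem.Dict.mk (Sb.map (fun g => (g, Fb g)))).insert (o q.1)
        (((PySem.Dict.mk (Sb.map (fun g => (g, Fb g)))).getD (o q.1) PySem.Dict.empty).insert (i q.1) q.2)).items = _
      rw [hgetD, items_ins_yes _ _ _ hcont, houter, if_pos hg, List.map_map]
      apply List.map_congr_left
      intro g hgS
      by_cases hgg : g = o q.1
      · subst hgg
        simp only [Function.comp_def, beq_self_eq_true, if_pos]
        refine congrArg (fun d => (o q.1, d)) ?_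
        apply PySem.Dict.ext
        rw [items_ins_not _ _ _ hconti]
        show (l.filter (fun r => o r.1 == o q.1)).map (fun r => (i r.1, r.2)) ++ [(i q.1, q.2)] = _
        rw [hfil, if_pos rfl, List.map_append]
        rfl
      · have hb : (g == o q.1) = false := by simp [hgg]
        simp only [Function.comp_def, hb, Bool.false_eq_true, if_false]
        rw [hfil, if_neg (fun hh => hgg hh.symm)]
        simp [hFb]
    · have hcont : (PySem.Dict.mk (Sb.map (fun g => (g, Fb g)))).contains (o q.1) = false := by
        rw [contains_mkmap]; simpa using hg
      have hgetD : (PySem.Dict.mk (Sb.map (fun g => (g, Fb g)))).getD (o q.1) PySem.Dict.empty = PySem.Dict.empty :=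
        getD_mkmap_not Sb Fb _ hg _
      have hfilnil : l.filter (fun r => o r.1 == o q.1) = [] := by
        rw [List.filter_eq_nil_iff]
        intro r hr hb
        simp only [beq_iff_eq] at hb
        exact hg (by rw [hSb, PySem.Set.mem_ofList]; exact hb ▸ List.mem_map_of_mem hr)
      apply PySem.Dict.ext
      show ((PySem.Dict.mk (Sb.map (fun g => (g, Fb g)))).insert (o q.1)
        (((PySem.Dict.mk (Sb.map (fun g => (g, Fb g)))).getD (o q.1) PySem.Dict.empty).insert (i q.1) q.2)).items = _
      rw [hgetD, items_ins_not _ _ _ hcont, houter, if_neg hg, List.map_append]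
      congr 1
      · apply List.map_congr_left
        intro g hgS
        rw [hfil, if_neg (fun hh => hg (by rw [hh]; exact hgS))]
        simp [hFb]
      · simp only [List.map_cons, List.map_nil]
        rw [hfil, if_pos rfl, hfilnil]
        rfl

theorem pv_dd1 (f : Int × Int → Int) (l : List (Int × Int)) :
    PySem.Set.ofList ((PySem.Set.ofList l).map f) = PySem.Set.ofList (l.map f) := by
  induction l using List.reverseRecOn with
  | nil => rfl
  | append_singleton l x ih =>
    rw [ofList_append_singleton, List.map_append, List.map_cons, List.map_nil, ofList_append_singleton]
    by_cases hx : x ∈ PySem.Set.ofList l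
    · rw [PySem.Set.add, if_pos (by simp [PySem.Set.contains_eq_decide, hx]), ih]
      have : f x ∈ PySem.Set.ofList (l.map f) := by
        rw [PySem.Set.mem_ofList]
        exact List.mem_map_of_mem ((PySem.Set.mem_ofList ..).mp hx)
      rw [PySem.Set.add, if_pos (by simp [PySem.Set.contains_eq_decide, this])]
    · rw [PySem.Set.add, if_neg (by simp [PySem.Set.contains_eq_decide, hx]), List.map_append,
         List.map_cons, List.map_nil, ofList_append_singleton, ih]

theorem pv_dd2 (o i : Int × Int → Int) (hinj : ∀ p q : Int × Int, o p = o q → i p = i q → p = q)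
    (g : Int) (l : List (Int × Int)) :
    ((PySem.Set.ofList l).filter (fun k => o k == g)).map i
      = PySem.Set.ofList ((l.filter (fun k => o k == g)).map i) := by
  induction l using List.reverseRecOn with
  | nil => rfl
  | append_singleton l x ih =>
    rw [ofList_append_singleton, List.filter_append]
    by_cases hox : o x = g
    · have hbx : (o x == g) = true := by simpa using hox
      simp only [List.filter_singleton, hbx, cond_true]
      by_cases hx : x ∈ PySem.Set.ofList l
      · rw [PySem.Set.add, if_pos (by simp [PySem.Set.contains_eq_decide, hx]), ih,
           List.map_append, List.map_cons, List.map_nil, ofList_append_singleton]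
        have hin : i x ∈ PySem.Set.ofList ((l.filter (fun k => o k == g)).map i) := by
          rw [PySem.Set.mem_ofList]
          exact List.mem_map_of_mem (List.mem_filter.2 ⟨(PySem.Set.mem_ofList ..).mp hx, hbx⟩)
        rw [PySem.Set.add, if_pos (by simp [PySem.Set.contains_eq_decide, hin])]
      · rw [PySem.Set.add, if_neg (by simp [PySem.Set.contains_eq_decide, hx]), List.filter_append]
        simp only [List.filter_singleton, hbx, cond_true]
        rw [List.map_append, List.map_cons, List.map_nil, List.map_append, List.map_cons, List.map_nil,
           ofList_append_singleton, ih]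
        have hnotin : ¬ i x ∈ PySem.Set.ofList ((l.filter (fun k => o k == g)).map i) := by
          rw [PySem.Set.mem_ofList]
          intro hmem
          obtain ⟨r, hrf, hri⟩ := List.mem_map.mp hmem
          have hro : o r = g := by simpa using (List.mem_filter.mp hrf).2
          have hrx : r = x := hinj r x (hro.trans hox.symm) hri
          exact hx (by rw [PySem.Set.mem_ofList]; exact hrx ▸ (List.mem_filter.mp hrf).1)
        rw [PySem.Set.add, if_neg (by simp [PySem.Set.contains_eq_decide, hnotin])]
    · have hbx : (o x == g) = false := by simpa using hox
      simp only [List.filter_singleton, hbx, cond_false, List.append_nil]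
      by_cases hx : x ∈ PySem.Set.ofList l
      · rw [PySem.Set.add, if_pos (by simp [PySem.Set.contains_eq_decide, hx]), ih]
      · rw [PySem.Set.add, if_neg (by simp [PySem.Set.contains_eq_decide, hx]), List.filter_append]
        simp only [List.filter_singleton, hbx, cond_false, List.append_nil]
        rw [ih]

theorem pv_charB (o i : Int × Int → Int) (hinj : ∀ p q : Int × Int, o p = o q → i p = i q → p = q)
    (pairs : List (Int × Int)) :
    ((PySem.Dict.counter pairs).items).foldl (pvReshapeStep o i) PySem.Dict.empty = pvCanon o i pairs := by
  rw [PySem.Dict.items_counter]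
  rw [pv_charB0 o i hinj _ (by
    rw [List.map_map]
    show ((PySem.Set.ofList pairs).map (Prod.fst ∘ fun k => (k, (pairs.count k : Int)))).Nodup
    simpa [Function.comp_def] using PySem.Set.nodup_ofList pairs)]
  unfold pvCanon
  congr 1
  have houter : ((PySem.Set.ofList pairs).map (fun k => (k, (pairs.count k : Int)))).map (fun q => o q.1) = (PySem.Set.ofList pairs).map o := by
    simp [List.map_map, Function.comp_def]
  rw [houter, pv_dd1]
  apply List.map_congr_left
  intro g hgS
  refine congrArg (fun d => (g, d)) (congrArg PySem.Dict.mk ?_)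
  rw [List.filter_map]
  have hcomp : ((fun q : (Int × Int) × Int => o q.1 == g) ∘ fun k => (k, (pairs.count k : Int))) = fun k => o k == g := by
    funext k; rfl
  rw [hcomp, List.map_map, ← pv_dd2 o i hinj g pairs, List.map_map]
  apply List.map_congr_left
  intro k hk
  have hkmem : k ∈ pairs := (PySem.Set.mem_ofList ..).mp (List.mem_filter.mp hk).1
  have hok : o k = g := by simpa using (List.mem_filter.mp hk).2
  show (i k, (pairs.count k : Int)) = (i k, ((pairs.filter (fun p => o p == g && i p == i k)).length : Int))
  refine congrArg (fun m => ((i k : Int), (m : Int))) ?_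
  rw [List.count_eq_countP, List.countP_eq_length_filter]
  refine congrArg (fun t : List (Int × Int) => (t.length : Int)) ?_
  apply List.filter_congr
  intro p hp
  by_cases hpk : p = k
  · subst hpk; simp [hok]
  · have h1 : (p == k) = false := by simpa using hpk
    rw [h1]
    by_cases ho : o p = g
    · by_cases hi : i p = i k
      · exact absurd (hinj p k (ho.trans hok.symm) hi) hpk
      · simp [hi]
    · simp [ho]

def pvBump (d : PySem.Dict Int Int) (k : Int) : PySem.Dict Int Int := d.insert k (d.getD k 0 + 1)

theorem pv_count_eq (d : PySem.Dict Int Int) (g : Int) :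
    (let d2 := if d.contains g = false then d.insert g 0 else d
     d2.insert g (d2.getD g 0 + 1)) = pvBump d g := by
  dsimp only
  by_cases h : d.contains g = true
  · rw [if_neg (show ¬ (d.contains g = false) by simp [h])]
    rfl
  · have hf : d.contains g = false := by simpa using h
    rw [if_pos hf, pvBump, PySem.Dict.getD_of_not_contains d 0 hf,
        PySem.Dict.getD_insert_self, PySem.Dict.insert_insert_self]

theorem pv_nest_eq (d : PySem.Dict Int (PySem.Dict Int Int)) (g c : Int) :
    (let d1 := if d.contains g = false then d.insert g (PySem.Dict.empty.insert c 0) else d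
     let d2 := if (d1.getD g PySem.Dict.empty).contains c = false then d1.insert g ((d1.getD g PySem.Dict.empty).insert c 0) else d1
     d2.insert g ((d2.getD g PySem.Dict.empty).insert c ((d2.getD g PySem.Dict.empty).getD c 0 + 1)))
    = d.insert g ((d.getD g PySem.Dict.empty).insert c ((d.getD g PySem.Dict.empty).getD c 0 + 1)) := by
  dsimp only
  by_cases hg : d.contains g = true
  · rw [if_neg (show ¬ (d.contains g = false) by simp [hg])]
    by_cases hc : (d.getD g PySem.Dict.empty).contains c = true
    · rw [if_neg (show ¬ ((d.getD g PySem.Dict.empty).contains c = false) by simp [hc])]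
    · have hcf : (d.getD g PySem.Dict.empty).contains c = false := by simpa using hc
      rw [if_pos hcf, PySem.Dict.getD_insert_self, PySem.Dict.insert_insert_self,
          PySem.Dict.getD_insert_self, PySem.Dict.insert_insert_self,
          PySem.Dict.getD_of_not_contains _ 0 hcf]
  · have hgf : d.contains g = false := by simpa using hg
    rw [if_pos hgf, PySem.Dict.getD_insert_self]
    rw [if_neg (by simp [PySem.Dict.contains_insert_self])]
    rw [PySem.Dict.getD_insert_self, PySem.Dict.insert_insert_self,
        PySem.Dict.getD_insert_self, PySem.Dict.insert_insert_self,
        PySem.Dict.getD_of_not_contains _ PySem.Dict.empty hgf, PySem.Dict.getD_empty]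

theorem pv_foldl_quad {α β γ δ ε : Type} (f1 : α → ε → α) (f2 : β → ε → β) (f3 : γ → ε → γ) (f4 : δ → ε → δ) :
    ∀ (l : List ε) (w : α) (x : β) (y : γ) (z : δ),
    l.foldl (fun st p => (f1 st.1 p, f2 st.2.1 p, f3 st.2.2.1 p, f4 st.2.2.2 p)) (w, x, y, z)
      = (l.foldl f1 w, l.foldl f2 x, l.foldl f3 y, l.foldl f4 z) := by
  intro l
  induction l with
  | nil => intro w x y z; rfl
  | cons p l ih => intro w x y z; simp only [List.foldl_cons]; exact ih _ _ _ _

theorem pv_foldl_triple {α β γ ε : Type} (f1 : α → ε → α) (f2 : β → ε → β) (f3 : γ → ε → γ) :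
    ∀ (l : List ε) (w : α) (x : β) (y : γ),
    l.foldl (fun st p => (f1 st.1 p, f2 st.2.1 p, f3 st.2.2 p)) (w, x, y)
      = (l.foldl f1 w, l.foldl f2 x, l.foldl f3 y) := by
  intro l
  induction l with
  | nil => intro w x y; rfl
  | cons p l ih => intro w x y; simp only [List.foldl_cons]; exact ih _ _ _

theorem pv_foldl_pair {α β ε : Type} (f1 : α → ε → α) (f2 : β → ε → β) :
    ∀ (l : List ε) (w : α) (x : β),
    l.foldl (fun st p => (f1 st.1 p, f2 st.2 p)) (w, x) = (l.foldl f1 w, l.foldl f2 x) := by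
  intro l
  induction l with
  | nil => intro w x; rfl
  | cons p l ih => intro w x; simp only [List.foldl_cons]; exact ih _ _

theorem pv_range_map (a b : List Int) (h : a.length ≤ b.length) :
    (PySem.List.pyRange 0 (a.length : Int) 1).map (fun ix => (PySem.List.pyGetD a ix 0, PySem.List.pyGetD b ix 0)) = a.zip b := by
  rw [PySem.List.pyRange_zero_natCast, List.map_map]
  apply List.ext_getElem
  · simp [List.length_zip]; omega
  · intro n h1 h2
    simp only [List.getElem_map, List.getElem_range, Function.comp_def, List.getElem_zip]
    rw [PySem.List.pyGetD_natCast, PySem.List.pyGetD_natCast]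
    have hn : n < a.length := by simpa using h1
    rw [List.getD_eq_getElem a 0 hn, List.getD_eq_getElem b 0 (lt_of_lt_of_le hn h)]

theorem pv_hinj1 : ∀ p q : Int × Int, Prod.fst p = Prod.fst q → Prod.snd p = Prod.snd q → p = q := by
  intro p q h1 h2; cases p; cases q; simp_all
theorem pv_hinj2 : ∀ p q : Int × Int, Prod.snd p = Prod.snd q → Prod.fst p = Prod.fst q → p = q := by
  intro p q h1 h2; cases p; cases q; simp_all

theorem pv_Aside (gt pred : List Int) (hpre : gt.length ≤ pred.length) :
    ((PySem.List.pyRange 0 (gt.length : Int) 1).foldl (fun st i =>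
      let ctg := st.1; let gtc := st.2.1; let gcc := st.2.2.1; let cc := st.2.2.2
      let g := PySem.List.pyGetD gt i 0
      let c := PySem.List.pyGetD pred i 0
      let gcc := if gcc.contains g = false then gcc.insert g 0 else gcc
      let gcc := gcc.insert g (gcc.getD g 0 + 1)
      let cc := if cc.contains c = false then cc.insert c 0 else cc
      let cc := cc.insert c (cc.getD c 0 + 1)
      let gtc := if gtc.contains g = false then gtc.insert g (PySem.Dict.empty.insert c 0) else gtc
      let gtc := if (gtc.getD g PySem.Dict.empty).contains c = false then gtc.insert g ((gtc.getD g PySem.Dict.empty).insert c 0) else gtc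
      let gtc := gtc.insert g ((gtc.getD g PySem.Dict.empty).insert c ((gtc.getD g PySem.Dict.empty).getD c 0 + 1))
      let ctg := if ctg.contains c = false then ctg.insert c (PySem.Dict.empty.insert g 0) else ctg
      let ctg := if (ctg.getD c PySem.Dict.empty).contains g = false then ctg.insert c ((ctg.getD c PySem.Dict.empty).insert g 0) else ctg
      let ctg := ctg.insert c ((ctg.getD c PySem.Dict.empty).insert g ((ctg.getD c PySem.Dict.empty).getD g 0 + 1))
      (ctg, gtc, gcc, cc))
    (PySem.Dict.empty, PySem.Dict.empty, PySem.Dict.empty, PySem.Dict.empty))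
  = (pvCanon Prod.snd Prod.fst (gt.zip pred), pvCanon Prod.fst Prod.snd (gt.zip pred),
     PySem.Dict.counter ((gt.zip pred).map Prod.fst), PySem.Dict.counter ((gt.zip pred).map Prod.snd)) := by
  have hbody : (fun (st : PySem.Dict Int (PySem.Dict Int Int) × PySem.Dict Int (PySem.Dict Int Int) × PySem.Dict Int Int × PySem.Dict Int Int) (i : Int) =>
      let ctg := st.1; let gtc := st.2.1; let gcc := st.2.2.1; let cc := st.2.2.2
      let g := PySem.List.pyGetD gt i 0
      let c := PySem.List.pyGetD pred i 0
      let gcc := if gcc.contains g = false then gcc.insert g 0 else gcc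
      let gcc := gcc.insert g (gcc.getD g 0 + 1)
      let cc := if cc.contains c = false then cc.insert c 0 else cc
      let cc := cc.insert c (cc.getD c 0 + 1)
      let gtc := if gtc.contains g = false then gtc.insert g (PySem.Dict.empty.insert c 0) else gtc
      let gtc := if (gtc.getD g PySem.Dict.empty).contains c = false then gtc.insert g ((gtc.getD g PySem.Dict.empty).insert c 0) else gtc
      let gtc := gtc.insert g ((gtc.getD g PySem.Dict.empty).insert c ((gtc.getD g PySem.Dict.empty).getD c 0 + 1))
      let ctg := if ctg.contains c = false then ctg.insert c (PySem.Dict.empty.insert g 0) else ctg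
      let ctg := if (ctg.getD c PySem.Dict.empty).contains g = false then ctg.insert c ((ctg.getD c PySem.Dict.empty).insert g 0) else ctg
      let ctg := ctg.insert c ((ctg.getD c PySem.Dict.empty).insert g ((ctg.getD c PySem.Dict.empty).getD g 0 + 1))
      (ctg, gtc, gcc, cc))
    = (fun st i =>
        (fun (st : PySem.Dict Int (PySem.Dict Int Int) × PySem.Dict Int (PySem.Dict Int Int) × PySem.Dict Int Int × PySem.Dict Int Int) (p : Int × Int) =>
          (pvStepN Prod.snd Prod.fst st.1 p, pvStepN Prod.fst Prod.snd st.2.1 p,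
           pvBump st.2.2.1 p.1, pvBump st.2.2.2 p.2)) st (PySem.List.pyGetD gt i 0, PySem.List.pyGetD pred i 0)) := by
    funext st i
    dsimp only [pvStepN]
    rw [pv_count_eq, pv_count_eq, pv_nest_eq, pv_nest_eq]
  rw [hbody]
  have h2 := List.foldl_map (f := fun ix => (PySem.List.pyGetD gt ix 0, PySem.List.pyGetD pred ix 0))
    (g := fun (st : PySem.Dict Int (PySem.Dict Int Int) × PySem.Dict Int (PySem.Dict Int Int) × PySem.Dict Int Int × PySem.Dict Int Int) (p : Int × Int) =>
          (pvStepN Prod.snd Prod.fst st.1 p, pvStepN Prod.fst Prod.snd st.2.1 p,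
           pvBump st.2.2.1 p.1, pvBump st.2.2.2 p.2))
    (l := PySem.List.pyRange 0 (gt.length : Int) 1)
    (init := (PySem.Dict.empty, PySem.Dict.empty, PySem.Dict.empty, PySem.Dict.empty))
  rw [← h2, pv_range_map gt pred hpre]
  refine Eq.trans (pv_foldl_quad (pvStepN Prod.snd Prod.fst) (pvStepN Prod.fst Prod.snd)
    (fun d p => pvBump d p.1) (fun d p => pvBump d p.2) (gt.zip pred) _ _ _ _) ?_
  rw [pv_charA Prod.snd Prod.fst pv_hinj2, pv_charA Prod.fst Prod.snd pv_hinj1]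
  have hc1 : (gt.zip pred).foldl (fun d p => pvBump d p.1) PySem.Dict.empty
      = PySem.Dict.counter ((gt.zip pred).map Prod.fst) := by
    rw [← PySem.Dict.foldl_insert_getD_add_one_eq_counter, List.foldl_map]
    rfl
  have hc2 : (gt.zip pred).foldl (fun d p => pvBump d p.2) PySem.Dict.empty
      = PySem.Dict.counter ((gt.zip pred).map Prod.snd) := by
    rw [← PySem.Dict.foldl_insert_getD_add_one_eq_counter, List.foldl_map]
    rfl
  rw [hc1, hc2]

theorem pv_Bside (gt pred : List Int) :
    aggregate_intersection_counts_alt gt pred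
      = ((pvCanon Prod.snd Prod.fst (gt.zip pred)).items.map (fun q => (q.1, q.2.items)),
         (pvCanon Prod.fst Prod.snd (gt.zip pred)).items.map (fun q => (q.1, q.2.items)),
         (PySem.Dict.counter ((gt.zip pred).map Prod.fst)).items,
         (PySem.Dict.counter ((gt.zip pred).map Prod.snd)).items) := by
  unfold aggregate_intersection_counts_alt
  dsimp only
  have hst : (gt.zip pred).foldl (fun st p =>
      (st.1.insert p (st.1.getD p 0 + 1),
       st.2.1.insert p.1 (st.2.1.getD p.1 0 + 1),
       st.2.2.insert p.2 (st.2.2.getD p.2 0 + 1)))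
    ((PySem.Dict.empty : PySem.Dict (Int × Int) Int), (PySem.Dict.empty : PySem.Dict Int Int), (PySem.Dict.empty : PySem.Dict Int Int))
      = (PySem.Dict.counter (gt.zip pred), PySem.Dict.counter ((gt.zip pred).map Prod.fst), PySem.Dict.counter ((gt.zip pred).map Prod.snd)) := by
    refine Eq.trans (pv_foldl_triple (fun (d : PySem.Dict (Int × Int) Int) (p : Int × Int) => d.insert p (d.getD p 0 + 1))
      (fun (d : PySem.Dict Int Int) (p : Int × Int) => d.insert p.1 (d.getD p.1 0 + 1))
      (fun (d : PySem.Dict Int Int) (p : Int × Int) => d.insert p.2 (d.getD p.2 0 + 1)) (gt.zip pred) _ _ _) ?_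
    refine congrArg₂ (fun a b => (a, b)) ?_ (congrArg₂ (fun a b => (a, b)) ?_ ?_)
    · exact PySem.Dict.foldl_insert_getD_add_one_eq_counter (gt.zip pred)
    · rw [← PySem.Dict.foldl_insert_getD_add_one_eq_counter, List.foldl_map]
    · rw [← PySem.Dict.foldl_insert_getD_add_one_eq_counter, List.foldl_map]
  rw [hst]
  have hst2 : (PySem.Dict.counter (gt.zip pred)).items.foldl (fun st2 (q : (Int × Int) × Int) =>
      (st2.1.modify q.1.1 PySem.Dict.empty (fun inner => inner.insert q.1.2 q.2),
       st2.2.modify q.1.2 PySem.Dict.empty (fun inner => inner.insert q.1.1 q.2)))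
    ((PySem.Dict.empty : PySem.Dict Int (PySem.Dict Int Int)), (PySem.Dict.empty : PySem.Dict Int (PySem.Dict Int Int)))
      = (pvCanon Prod.fst Prod.snd (gt.zip pred), pvCanon Prod.snd Prod.fst (gt.zip pred)) := by
    refine Eq.trans (pv_foldl_pair (pvReshapeStep Prod.fst Prod.snd) (pvReshapeStep Prod.snd Prod.fst)
      (PySem.Dict.counter (gt.zip pred)).items _ _) ?_
    rw [pv_charB Prod.fst Prod.snd pv_hinj1, pv_charB Prod.snd Prod.fst pv_hinj2]
  rw [hst2]


theorem pv_main (gt pred : List Int) (hpre : gt.length ≤ pred.length) :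
    aggregate_intersection_counts gt pred = aggregate_intersection_counts_alt gt pred := by
  rw [pv_Bside]
  unfold aggregate_intersection_counts
  exact congrArg (fun st : PySem.Dict Int (PySem.Dict Int Int) × PySem.Dict Int (PySem.Dict Int Int) × PySem.Dict Int Int × PySem.Dict Int Int =>
    (st.1.items.map (fun q => (q.1, q.2.items)), st.2.1.items.map (fun q => (q.1, q.2.items)), st.2.2.1.items, st.2.2.2.items))
    (pv_Aside gt pred hpre)

-- ===== VERDICT (by name: the statement is the Claim_ definition above) =====
theorem aggregate_intersection_counts_spec : Claim_equal_aggregate_intersection_counts := by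
  intro gt_labels predicted_labels _ hpre
  unfold Spec_aggregate_intersection_counts
  exact pv_main gt_labels predicted_labels hpre
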